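-- pv_equiv track=rewrite | github.com/zcarc/problem-solving | Programmers/level2/기능개발.py | solution
-- ===== SOURCE A (Python) =====
-- from collections import deque
--
-- def solution(progresses, speeds):
--     length = len(progresses)
--     dq = deque()
--     res = []
--
--     for i in range(length):
--
--         cnt = 1
--         while progresses[i] + (speeds[i] * cnt) < 100:
--             cnt += 1
--
--         if not dq:
--             dq.append(cnt)
--         else:
--             if dq[0] >= cnt:
--                 dq.append(cnt)
--             else:
--                 res.append(len(dq))
--                 dq.clear()
--                 dq.append(cnt)
--
--     if dq:
--         res.append(len(dq))
--
--     return res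
-- ===== SOURCE B (Python) =====
-- def solution(progresses, speeds):
--     days = [1 if p + s >= 100 else -(-(100 - p) // s)
--             for p, s in zip(progresses, speeds)]
--     res = []
--     if not days:
--         return res
--     front = days[0]
--     count = 1
--     for d in days[1:]:
--         if d <= front:
--             count += 1
--         else:
--             res.append(count)
--             front = d
--             count = 1
--     res.append(count)
--     return res
-- ===== Notes on version B (the rewrite author's own statement) =====
-- stated objective: simpler
-- what changed: Replaces the per-feature counting while-loop with a closed-form ceiling division and replaces the deque holding every pending count with two integers (the current cycle's front day and a running count) in a single pass.
import Mathlib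
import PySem

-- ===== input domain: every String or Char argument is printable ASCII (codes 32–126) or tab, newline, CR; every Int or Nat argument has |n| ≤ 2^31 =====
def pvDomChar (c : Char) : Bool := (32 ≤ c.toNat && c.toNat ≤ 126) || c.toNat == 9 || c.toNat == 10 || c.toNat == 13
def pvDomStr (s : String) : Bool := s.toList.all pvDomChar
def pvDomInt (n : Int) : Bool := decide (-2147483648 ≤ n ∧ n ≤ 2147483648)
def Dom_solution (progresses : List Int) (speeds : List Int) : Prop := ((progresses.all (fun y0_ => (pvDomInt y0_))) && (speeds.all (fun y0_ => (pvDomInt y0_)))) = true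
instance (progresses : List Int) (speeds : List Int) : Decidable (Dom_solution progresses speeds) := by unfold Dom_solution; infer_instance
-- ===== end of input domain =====

-- B replaces A's per-feature counting while-loop by a closed-form ceiling division and
-- A's deque by two integers (front day, running count) in a single pass: simpler.

-- ===== PORT A =====
-- the inner 'cnt = 1; while progresses[i] + speeds[i]*cnt < 100: cnt += 1' loop,
-- written with fuel as a totality guard only: Pre_ guarantees the Python loop terminates,
-- and the fuel chosen in cntLoop below is proved sufficient on Pre_ (lemma day_eq)
def cntLoopF : Nat → Int → Int → Int → Int
  | 0, _, _, cnt => cnt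
  | f + 1, p, s, cnt => if p + s * cnt < 100 then cntLoopF f p s (cnt + 1) else cnt

def cntLoop (p : Int) (s : Int) (cnt : Int) : Int :=
  cntLoopF ((100 - p).toNat + 1) p s cnt

-- one iteration of A's for-loop body on the state (dq, res), given this feature's cnt
def stepA (st : List Int × List Int) (cnt : Int) : List Int × List Int :=
  match st with
  | (dq, res) =>
    match dq with
    | [] => (dq ++ [cnt], res)
    | d0 :: _ => if d0 ≥ cnt then (dq ++ [cnt], res) else ([cnt], res ++ [(dq.length : Int)])

-- the trailing 'if dq: res.append(len(dq))'
def finA (st : List Int × List Int) : List Int :=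
  if st.1 ≠ [] then st.2 ++ [(st.1.length : Int)] else st.2

def solution (progresses : List Int) (speeds : List Int) : List Int :=
  let length := progresses.length
  -- progresses[i]/speeds[i] read with getD 0 (exact: Pre_ keeps i in range)
  finA ((List.range length).foldl
    (fun st i => stepA st (cntLoop (progresses.getD i 0) (speeds.getD i 0) 1)) ([], []))

-- ===== PORT B =====
-- closed-form day count: 1 if p + s >= 100 else -(-(100 - p) // s)
def dayB (p : Int) (s : Int) : Int :=
  if p + s ≥ 100 then 1 else -(PySem.Int.floordiv (-(100 - p)) s)

-- the 'for d in days[1:]' loop carrying (front, count)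
def groupGo (front : Int) (count : Int) : List Int → List Int
  | [] => [count]
  | d :: rest => if d ≤ front then groupGo front (count + 1) rest
                 else count :: groupGo d 1 rest

def solution_alt (progresses : List Int) (speeds : List Int) : List Int :=
  let days := (progresses.zip speeds).map (fun ps => dayB ps.1 ps.2)
  match days with
  | [] => []
  | d0 :: rest => groupGo d0 1 rest

-- ===== PRECONDITION & SPEC =====
-- Pre_ excludes exactly the inputs where Python A does not return: speeds shorter than
-- progresses (IndexError) and a feature with non-positive speed still below 100 after one
-- day (the while loop never terminates).
def Pre_solution (progresses : List Int) (speeds : List Int) : Prop :=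
  progresses.length ≤ speeds.length ∧
  ∀ ps ∈ progresses.zip speeds, 0 < ps.2 ∨ ps.1 + ps.2 ≥ 100
instance (progresses : List Int) (speeds : List Int) : Decidable (Pre_solution progresses speeds) := by unfold Pre_solution; infer_instance

def pvWitness_solution : List Int × List Int := ([93, 30, 55], [1, 30, 5])

def Spec_solution (progresses : List Int) (speeds : List Int) (out : List Int) : Prop := out = solution_alt progresses speeds
instance (progresses : List Int) (speeds : List Int) (out : List Int) : Decidable (Spec_solution progresses speeds out) := by unfold Spec_solution; infer_instance

-- ===== CLAIM (what is proved, stated in full; the proofs are below) =====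
def Claim_equal_solution : Prop := ∀ (progresses : List Int) (speeds : List Int), Dom_solution progresses speeds → Pre_solution progresses speeds → Spec_solution progresses speeds (solution progresses speeds)

-- ===== LEMMAS AND PROOFS =====

-- the loop guard vs the ceiling: for 0 < s, '100 ≤ p + s*cnt' iff 'ceil((100-p)/s) ≤ cnt'
lemma ceil_le_iff (p s cnt : Int) (hs : 0 < s) :
    -(PySem.Int.floordiv (p - 100) s) ≤ cnt ↔ 100 ≤ p + s * cnt := by
  rw [neg_le, PySem.Int.le_floordiv_iff_mul_le hs]
  constructor <;> intro h <;> nlinarith [h]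

-- characterisation of A's inner loop for positive speed, given sufficient fuel
lemma cntLoopF_pos (p s : Int) (hs : 0 < s) :
    ∀ (f : Nat) (cnt : Int), -(PySem.Int.floordiv (p - 100) s) ≤ cnt + f →
    cntLoopF f p s cnt = max cnt (-(PySem.Int.floordiv (p - 100) s)) := by
  intro f
  induction f with
  | zero =>
    intro cnt hf
    simp only [cntLoopF]
    omega
  | succ f ih =>
    intro cnt hf
    simp only [cntLoopF]
    by_cases h : p + s * cnt < 100
    · rw [if_pos h, ih (cnt + 1) (by push_cast at hf ⊢; omega)]
      have h1 : ¬ (-(PySem.Int.floordiv (p - 100) s) ≤ cnt) := by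
        rw [ceil_le_iff p s cnt hs]; omega
      omega
    · rw [if_neg h]
      have h2 : -(PySem.Int.floordiv (p - 100) s) ≤ cnt := by
        rw [ceil_le_iff p s cnt hs]; omega
      omega

-- the two day computations agree on Pre_'s per-feature condition
lemma day_eq (p s : Int) (h : 0 < s ∨ p + s ≥ 100) :
    cntLoop p s 1 = dayB p s := by
  unfold cntLoop dayB
  rcases h with hs | hps
  · have hceil : -(PySem.Int.floordiv (p - 100) s) ≤ 1 + ((100 - p).toNat + 1 : Nat) := by
      by_cases hp : p ≥ 100
      · rw [ceil_le_iff p s _ hs]; push_cast; nlinarith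
      · rw [ceil_le_iff p s _ hs]; push_cast
        have : (100 - p).toNat = 100 - p := by omega
        nlinarith [this]
    rw [cntLoopF_pos p s hs _ 1 hceil]
    have hneg : -(100 - p) = p - 100 := by ring
    rw [hneg]
    by_cases h1 : p + s ≥ 100
    · rw [if_pos h1]
      have := (ceil_le_iff p s 1 hs).mpr (by omega)
      omega
    · rw [if_neg h1]
      have : ¬ (-(PySem.Int.floordiv (p - 100) s) ≤ 1) := by
        rw [ceil_le_iff p s 1 hs]; omega
      omega
  · simp only [cntLoopF]
    rw [if_neg (by omega), if_pos hps]

-- A's fold + finalisation equals B's groupGo,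
-- given dq nonempty with head front and length count
lemma fold_group (l : List Int) :
    ∀ (front count : Int) (dq res : List Int),
    dq.head? = some front → (dq.length : Int) = count →
    finA (l.foldl stepA (dq, res)) = res ++ groupGo front count l := by
  induction l with
  | nil =>
    intro front count dq res hhd hlen
    have : dq ≠ [] := by intro h; simp [h] at hhd
    simp [finA, groupGo, this, hlen]
  | cons d l ih =>
    intro front count dq res hhd hlen
    obtain ⟨t, rfl⟩ : ∃ t, dq = front :: t := by
      cases dq with
      | nil => simp at hhd
      | cons a t => simp at hhd; exact ⟨t, by rw [hhd]⟩
    simp only [List.foldl_cons, stepA, groupGo]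
    by_cases hle : d ≤ front
    · rw [if_pos (by omega : front ≥ d), if_pos hle]
      exact ih front (count + 1) ((front :: t) ++ [d]) res (by simp) (by simp at hlen ⊢; omega)
    · rw [if_neg (by omega : ¬ front ≥ d), if_neg hle]
      rw [ih d 1 [d] (res ++ [((front :: t).length : Int)]) (by simp) (by simp)]
      simp only [← hlen]
      simp

-- the cnt values A computes index-by-index are exactly B's days list
lemma days_eq (progresses speeds : List Int)
    (hlen : progresses.length ≤ speeds.length)
    (hpre : ∀ ps ∈ progresses.zip speeds, 0 < ps.2 ∨ ps.1 + ps.2 ≥ 100) :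
    (List.range progresses.length).map
      (fun i => cntLoop (progresses.getD i 0) (speeds.getD i 0) 1)
    = (progresses.zip speeds).map (fun ps => dayB ps.1 ps.2) := by
  apply List.ext_getElem
  · simp [List.length_zip]; omega
  · intro i h1 h2
    simp only [List.getElem_map, List.getElem_range, List.getElem_zip]
    have hip : i < progresses.length := by simpa using h1
    have his : i < speeds.length := by omega
    rw [List.getD_eq_getElem _ _ hip, List.getD_eq_getElem _ _ his]
    apply day_eq
    have : (progresses[i], speeds[i]) ∈ progresses.zip speeds := by
      rw [List.mem_iff_getElem]
      exact ⟨i, by simp [List.length_zip]; omega, by simp⟩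
    exact hpre _ this

-- ===== VERDICT (by name: the statement is the Claim_ definition above) =====
theorem solution_spec : Claim_equal_solution := by
  intro progresses speeds _ hpre
  obtain ⟨hlen, hcond⟩ := hpre
  unfold Spec_solution solution solution_alt
  simp only []
  rw [show (List.range progresses.length).foldl
        (fun st i => stepA st (cntLoop (progresses.getD i 0) (speeds.getD i 0) 1)) ([], [])
      = ((List.range progresses.length).map
          (fun i => cntLoop (progresses.getD i 0) (speeds.getD i 0) 1)).foldl stepA ([], [])
      from (List.foldl_map ..).symm]
  rw [days_eq progresses speeds hlen hcond]
  cases h : (progresses.zip speeds).map (fun ps => dayB ps.1 ps.2) with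
  | nil => simp [finA]
  | cons d0 rest =>
    simp only [List.foldl_cons, stepA]
    exact fold_group rest d0 1 [d0] [] (by simp) (by simp)
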